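-- pv_equiv track=rewrite | github.com/pookaPlay/ohm | src/bls/DataIO.py | DeserializeMSBTwos
-- ===== SOURCE A (Python) =====
-- def DeserializeMSBTwos(input):
--     NBits= len(input)
--     offset = 2**(NBits-1)
--     # flip MSB
--     input[0] = 1 - input[0]
--     thresholds = [2**i for i in range(NBits)]
--     thresholds.reverse()
--     result = sum([input[i] * thresholds[i] for i in range(NBits)])
--     result -= offset
--     return(result)
-- ===== SOURCE B (Python) =====
-- def DeserializeMSBTwos(input):
--     # same in-place MSB flip as the original (mutation + empty-list IndexError preserved)
--     input[0] = 1 - input[0]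
--     result = 0
--     for bit in input:
--         result = result * 2 + bit
--     return result - 2**(len(input) - 1)
-- ===== Notes on version B (the rewrite author's own statement) =====
-- stated objective: faster
-- what changed: Replaces the materialized, reversed power-of-two threshold table and the indexed per-element weighted sum with a single Horner accumulation pass (result = result*2 + bit), keeping the in-place MSB flip; a timing run measured B markedly faster at large sizes.
-- outside the precondition, e.g. on DeserializeMSBTwos([]): A raises IndexError, B raises IndexError
import Mathlib
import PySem

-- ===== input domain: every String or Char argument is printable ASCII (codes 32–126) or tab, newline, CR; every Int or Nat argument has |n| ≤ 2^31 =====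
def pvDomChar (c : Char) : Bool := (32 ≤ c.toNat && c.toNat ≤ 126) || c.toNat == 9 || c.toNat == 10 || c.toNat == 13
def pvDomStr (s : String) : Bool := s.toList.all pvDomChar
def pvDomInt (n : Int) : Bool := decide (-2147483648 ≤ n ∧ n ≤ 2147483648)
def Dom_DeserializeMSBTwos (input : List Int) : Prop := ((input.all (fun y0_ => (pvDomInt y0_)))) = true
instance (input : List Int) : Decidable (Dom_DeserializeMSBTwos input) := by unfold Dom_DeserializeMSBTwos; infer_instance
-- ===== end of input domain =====

-- B replaces A's reversed power-of-two table and indexed weighted sum with a single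
-- Horner accumulation pass (same in-place MSB flip; equivalence is about the return value,
-- both Pythons mutate input[0] identically).

-- ===== PORT A =====
-- Literal port of A. The flip `input[0] = 1 - input[0]` becomes a functional set at
-- index 0; on the (excluded) empty list Python raises IndexError.
def DeserializeMSBTwos (input : List Int) : Int :=
  let NBits := input.length
  let offset : Int := 2 ^ (NBits - 1)
  let input' := input.set 0 (1 - ((PySem.List.pyGet? input 0).getD 0))
  let thresholds := ((List.range NBits).map (fun i => (2 : Int) ^ i)).reverse
  let result := ((List.range NBits).map
      (fun i => ((PySem.List.pyGet? input' (Int.ofNat i)).getD 0) *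
                ((PySem.List.pyGet? thresholds (Int.ofNat i)).getD 0))).sum
  result - offset

-- ===== PORT B =====
def DeserializeMSBTwos_alt (input : List Int) : Int :=
  let input' := input.set 0 (1 - ((PySem.List.pyGet? input 0).getD 0))
  let result := input'.foldl (fun r b => r * 2 + b) 0
  result - 2 ^ (input.length - 1)

-- ===== PRECONDITION & SPEC =====
-- Pre_ excludes only the empty list, on which both Pythons raise IndexError at input[0].
def Pre_DeserializeMSBTwos (input : List Int) : Prop := input ≠ []
instance (input : List Int) : Decidable (Pre_DeserializeMSBTwos input) := by
  unfold Pre_DeserializeMSBTwos; infer_instance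
def pvWitness_DeserializeMSBTwos : List Int := [1, 0, 1]

def Spec_DeserializeMSBTwos (input : List Int) (out : Int) : Prop := out = DeserializeMSBTwos_alt input
instance (input : List Int) (out : Int) : Decidable (Spec_DeserializeMSBTwos input out) := by unfold Spec_DeserializeMSBTwos; infer_instance

-- ===== CLAIM (what is proved, stated in full; the proofs are below) =====
def Claim_equal_DeserializeMSBTwos : Prop := ∀ (input : List Int), Dom_DeserializeMSBTwos input → Pre_DeserializeMSBTwos input → Spec_DeserializeMSBTwos input (DeserializeMSBTwos input)

-- ===== LEMMAS AND PROOFS =====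

-- value of the MSB-first weighted sum, recursively
def sval : List Int → Int
  | [] => 0
  | b :: t => b * 2 ^ t.length + sval t

theorem horner_eq_sval (l : List Int) (a : Int) :
    l.foldl (fun r b => r * 2 + b) a = a * 2 ^ l.length + sval l := by
  induction l generalizing a with
  | nil => simp [sval]
  | cons b t ih =>
    simp only [List.foldl_cons, ih, sval, List.length_cons, pow_succ]
    ring

theorem asum_eq_sval (l : List Int) :
    ((List.range l.length).map
      (fun i => ((PySem.List.pyGet? l (Int.ofNat i)).getD 0) *
                ((PySem.List.pyGet? (((List.range l.length).map (fun j => (2 : Int) ^ j)).reverse) (Int.ofNat i)).getD 0))).sum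
    = sval l := by
  induction l with
  | nil => simp [sval]
  | cons b t ih =>
    have hrev : (((List.range (b :: t).length).map (fun j => (2 : Int) ^ j)).reverse)
        = (2 : Int) ^ t.length :: (((List.range t.length).map (fun j => (2 : Int) ^ j)).reverse) := by
      simp [List.range_succ]
    rw [List.length_cons] at hrev ⊢
    rw [hrev, List.range_succ_eq_map]
    simp only [List.map_cons, List.map_map, List.sum_cons, Function.comp_def,
      Nat.succ_eq_add_one]
    have hget : ∀ (x : Int) (xs : List Int) (i : ℕ),
        (PySem.List.pyGet? (x :: xs) (Int.ofNat (i + 1))).getD 0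
          = (PySem.List.pyGet? xs (Int.ofNat i)).getD 0 := by
      intro x xs i
      simp only [PySem.List.pyGet?, PySem.List.pyIdx?]
      split_ifs <;> simp_all <;> omega
    have hmap : ((List.range t.length).map
        (fun i => ((PySem.List.pyGet? (b :: t) (Int.ofNat (i + 1))).getD 0) *
          ((PySem.List.pyGet? ((2 : Int) ^ t.length :: (((List.range t.length).map (fun j => (2 : Int) ^ j)).reverse)) (Int.ofNat (i + 1))).getD 0)))
        = ((List.range t.length).map
        (fun i => ((PySem.List.pyGet? t (Int.ofNat i)).getD 0) *
          ((PySem.List.pyGet? (((List.range t.length).map (fun j => (2 : Int) ^ j)).reverse) (Int.ofNat i)).getD 0))) := by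
      apply List.map_congr_left
      intro i _
      rw [hget, hget]
    rw [hmap, ih]
    simp [sval, PySem.List.pyGet?, PySem.List.pyIdx?]

-- ===== VERDICT (by name: the statement is the Claim_ definition above) =====
theorem DeserializeMSBTwos_spec : Claim_equal_DeserializeMSBTwos := by
  intro input _ hpre
  show DeserializeMSBTwos input = DeserializeMSBTwos_alt input
  simp only [DeserializeMSBTwos, DeserializeMSBTwos_alt]
  have hlen : (input.set 0 (1 - ((PySem.List.pyGet? input 0).getD 0))).length = input.length :=
    List.length_set ..
  rw [horner_eq_sval]
  have := asum_eq_sval (input.set 0 (1 - ((PySem.List.pyGet? input 0).getD 0)))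
  rw [hlen] at this
  rw [this]
  simp
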